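-- pv_equiv track=rewrite | github.com/dan1707/coding-challenge | src/coding_challenge/codeforces/gift_set.py | get_gift_set_count
-- ===== SOURCE A (Python) =====
-- import math
--
-- def get_gift_set_count(red: int, blue: int, a: int, b: int) -> int:
--     if a > red or b > blue:
--         return 0
--
--     first_candy_count = math.trunc(red / a)
--     second_candy_count = math.trunc(blue / b)
--     gs_count = first_candy_count if first_candy_count < second_candy_count else second_candy_count
--     remaining_red = red - gs_count * a
--     remaining_blue = blue - gs_count * b
--
--     if gs_count > 0 and remaining_red > 0 and remaining_blue > 0:
--         gs_count += get_gift_set_count(remaining_red, remaining_blue, b, a)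
--     return gs_count
-- ===== SOURCE B (Python) =====
-- import math
--
-- def _phase(red, blue, a, b):
--     """One greedy round: (gifts taken, whether another round starts, leftovers)."""
--     if a > red or b > blue:
--         return 0, False, 0, 0
--     gs = min(math.trunc(red / a), math.trunc(blue / b))
--     rr = red - gs * a
--     rb = blue - gs * b
--     return gs, gs > 0 and rr > 0 and rb > 0, rr, rb
--
-- def get_gift_set_count(red: int, blue: int, a: int, b: int) -> int:
--     # The swapping process stabilises after at most three rounds (the min-side
--     # remainder of a continued round is below its divisor, and the next round
--     # strictly shrinks both leftovers, so round 3 takes 0 gifts and stops);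
--     # compute the three rounds straight-line instead of recursing.
--     g1, c1, r1, b1 = _phase(red, blue, a, b)
--     if not c1:
--         return g1
--     g2, c2, r2, b2 = _phase(r1, b1, b, a)
--     if not c2:
--         return g1 + g2
--     g3 = _phase(r2, b2, a, b)[0]
--     return g1 + g2 + g3
-- ===== Notes on version B (the rewrite author's own statement) =====
-- stated objective: alternative
-- what changed: Replaced A's unbounded swapping recursion by a straight-line, non-recursive three-phase computation, justified by a proved bound that the process always stops within three rounds (a continued round leaves its min-side remainder below the divisor and the next round strictly shrinks both leftovers, so round three takes zero gifts).
-- outside the precondition, e.g. on get_gift_set_count(5, 5, 0, 1): A raises ZeroDivisionError, B raises ZeroDivisionError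
import Mathlib
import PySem

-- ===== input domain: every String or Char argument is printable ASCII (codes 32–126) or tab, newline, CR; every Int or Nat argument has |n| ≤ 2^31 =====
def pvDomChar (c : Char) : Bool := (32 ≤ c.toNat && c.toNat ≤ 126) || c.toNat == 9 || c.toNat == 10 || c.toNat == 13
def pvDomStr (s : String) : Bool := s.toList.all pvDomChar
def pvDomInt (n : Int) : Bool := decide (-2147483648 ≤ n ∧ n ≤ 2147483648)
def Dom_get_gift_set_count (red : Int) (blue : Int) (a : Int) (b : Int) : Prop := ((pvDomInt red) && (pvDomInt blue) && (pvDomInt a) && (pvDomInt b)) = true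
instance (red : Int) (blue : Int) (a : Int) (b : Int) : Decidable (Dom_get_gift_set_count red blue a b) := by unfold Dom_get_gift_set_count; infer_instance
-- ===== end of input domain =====

-- B replaces A's unbounded swapping recursion by a NON-RECURSIVE three-phase
-- straight-line computation, justified by a proved bound: a continued round
-- leaves its min-side remainder below the divisor and the next round strictly
-- shrinks both leftovers, so round three takes zero gifts and stops.
-- Within the stated domain |n| ≤ 2^31, Python's math.trunc(red / a) equals exact
-- truncating integer division (the quotient magnitudes stay far below 2^53),
-- so both ports use Int.tdiv for it.

-- termination lemmas for port A, cited by its decreasing_by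
theorem pv_gift_pos (red a gs : Int) (ha : a ≤ red) (hga : gs ≤ red.tdiv a)
    (h1 : 0 < gs) (h2 : 0 < red - gs * a) : 0 < a := by
  rcases lt_trichotomy a 0 with hneg | rfl | hpos
  · exfalso
    have hq : 0 < red.tdiv a := lt_of_lt_of_le h1 hga
    have hredneg : red < 0 := by
      by_contra h
      push Not at h
      have : red.tdiv a ≤ 0 := Int.tdiv_nonpos_of_nonneg_of_nonpos h (le_of_lt hneg)
      omega
    have hrw : red.tdiv a = (-red).tdiv (-a) := by
      rw [Int.neg_tdiv_neg]
    have h2' : (0:Int) < -a := by omega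
    have hed : (-red).tdiv (-a) = (-red) / (-a) := Int.tdiv_eq_ediv_of_nonneg (by omega)
    have hone : 1 ≤ (-red) / (-a) := by omega
    have hle : 1 * (-a) ≤ (-red) := (Int.le_ediv_iff_mul_le h2').mp hone
    have hra : red = a := by omega
    have hdiv1 : red.tdiv a = 1 := by
      rw [hra]; exact Int.tdiv_self (by omega)
    have hgs1 : gs = 1 := by omega
    rw [hra, hgs1, one_mul] at h2
    omega
  · exfalso
    simp [Int.tdiv_zero] at hga
    omega
  · exact hpos

theorem pv_gift_dec (red blue a b gs : Int) (h0 : ¬(a > red ∨ b > blue))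
    (hga : gs ≤ red.tdiv a) (hgb : gs ≤ blue.tdiv b)
    (h1 : 0 < gs) (h2 : 0 < red - gs * a) (h3 : 0 < blue - gs * b) :
    (red - gs * a + (blue - gs * b)).toNat < (red + blue).toNat := by
  push Not at h0
  obtain ⟨ha, hb⟩ := h0
  have hA : 0 < a := pv_gift_pos red a gs ha hga h1 h2
  have hB : 0 < b := pv_gift_pos blue b gs hb hgb h1 h3
  have hga' : 0 < gs * a := mul_pos h1 hA
  have hgb' : 0 < gs * b := mul_pos h1 hB
  omega

-- ===== PORT A =====
def get_gift_set_count (red : Int) (blue : Int) (a : Int) (b : Int) : Int :=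
  if h0 : a > red ∨ b > blue then 0
  else
    let first_candy_count := red.tdiv a
    let second_candy_count := blue.tdiv b
    let gs_count := if first_candy_count < second_candy_count then first_candy_count else second_candy_count
    let remaining_red := red - gs_count * a
    let remaining_blue := blue - gs_count * b
    if hc : 0 < gs_count ∧ 0 < remaining_red ∧ 0 < remaining_blue then
      gs_count + get_gift_set_count remaining_red remaining_blue b a
    else gs_count
termination_by (red + blue).toNat
decreasing_by
  exact pv_gift_dec red blue a b _ h0 (by split <;> omega) (by split <;> omega) hc.1 hc.2.1 hc.2.2

-- ===== PORT B =====
-- one greedy round: (gifts taken, whether another round starts, leftovers)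
def giftPhase (red : Int) (blue : Int) (a : Int) (b : Int) : Int × Bool × Int × Int :=
  if a > red ∨ b > blue then (0, false, 0, 0)
  else
    let gs := min (red.tdiv a) (blue.tdiv b)
    let rr := red - gs * a
    let rb := blue - gs * b
    (gs, decide (0 < gs ∧ 0 < rr ∧ 0 < rb), rr, rb)

def get_gift_set_count_alt (red : Int) (blue : Int) (a : Int) (b : Int) : Int :=
  match giftPhase red blue a b with
  | (g1, c1, r1, b1) =>
    if !c1 then g1
    else
      match giftPhase r1 b1 b a with
      | (g2, c2, r2, b2) =>
        if !c2 then g1 + g2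
        else g1 + g2 + (giftPhase r2 b2 a b).1

-- ===== PRECONDITION & SPEC =====
-- Pre_ excludes exactly the inputs on which Python A raises ZeroDivisionError:
-- those where the guard is passed (a ≤ red and b ≤ blue) but a = 0 or b = 0.
def Pre_get_gift_set_count (red : Int) (blue : Int) (a : Int) (b : Int) : Prop :=
  (a ≤ red ∧ b ≤ blue) → (a ≠ 0 ∧ b ≠ 0)
instance (red : Int) (blue : Int) (a : Int) (b : Int) : Decidable (Pre_get_gift_set_count red blue a b) := by unfold Pre_get_gift_set_count; infer_instance

def pvWitness_get_gift_set_count : Int × Int × Int × Int := (10, 5, 2, 3)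

def Spec_get_gift_set_count (red : Int) (blue : Int) (a : Int) (b : Int) (out : Int) : Prop := out = get_gift_set_count_alt red blue a b
instance (red : Int) (blue : Int) (a : Int) (b : Int) (out : Int) : Decidable (Spec_get_gift_set_count red blue a b out) := by unfold Spec_get_gift_set_count; infer_instance

-- ===== CLAIM (what is proved, stated in full; the proofs are below) =====
def Claim_equal_get_gift_set_count : Prop := ∀ (red : Int) (blue : Int) (a : Int) (b : Int), Dom_get_gift_set_count red blue a b → Pre_get_gift_set_count red blue a b → Spec_get_gift_set_count red blue a b (get_gift_set_count red blue a b)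

-- ===== LEMMAS AND PROOFS =====

-- A computes exactly one giftPhase round and recurses iff the flag is set
theorem A_phase (red blue a b : Int) : get_gift_set_count red blue a b =
    match giftPhase red blue a b with
    | (g, c, rr, rb) => if c then g + get_gift_set_count rr rb b a else g := by
  rw [get_gift_set_count, giftPhase]
  by_cases h0 : a > red ∨ b > blue
  · simp [h0]
  · simp only [dif_neg h0, if_neg h0]
    have hmin : min (red.tdiv a) (blue.tdiv b)
        = if red.tdiv a < blue.tdiv b then red.tdiv a else blue.tdiv b := by
      rw [Int.min_def]; split_ifs <;> omega
    rw [hmin]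
    set g := if red.tdiv a < blue.tdiv b then red.tdiv a else blue.tdiv b with hg
    by_cases hc : 0 < g ∧ 0 < red - g * a ∧ 0 < blue - g * b
    · simp [hc]
    · simp [hc]

-- inverting a round that set its continuation flag
theorem phase_true_elim (red blue a b g rr rb : Int)
    (h : giftPhase red blue a b = (g, true, rr, rb)) :
    a ≤ red ∧ b ≤ blue ∧ g = min (red.tdiv a) (blue.tdiv b) ∧
    rr = red - g * a ∧ rb = blue - g * b ∧ 0 < g ∧ 0 < rr ∧ 0 < rb := by
  rw [giftPhase] at h
  by_cases h0 : a > red ∨ b > blue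
  · simp [h0] at h
  · simp only [if_neg h0, Prod.mk.injEq] at h
    obtain ⟨hg, hc, hrr, hrb⟩ := h
    have hc' := of_decide_eq_true hc
    push Not at h0
    subst hg hrr hrb
    exact ⟨h0.1, h0.2, rfl, rfl, rfl, hc'.1, hc'.2.1, hc'.2.2⟩

-- after two continued rounds, the third round takes no gifts
theorem phase3_stop (red blue a b g1 r1 b1 g2 r2 b2 : Int)
    (h1 : giftPhase red blue a b = (g1, true, r1, b1))
    (h2 : giftPhase r1 b1 b a = (g2, true, r2, b2)) :
    (giftPhase r2 b2 a b).2.1 = false := by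
  obtain ⟨ha, hb, hg1, hr1, hb1, hg1p, hr1p, hb1p⟩ := phase_true_elim _ _ _ _ _ _ _ h1
  obtain ⟨hb', ha', hg2, hr2, hb2, hg2p, hr2p, hb2p⟩ := phase_true_elim _ _ _ _ _ _ _ h2
  have hA : 0 < a := pv_gift_pos red a g1 ha (hg1 ▸ min_le_left _ _) hg1p (hr1 ▸ hr1p)
  have hB : 0 < b := pv_gift_pos blue b g1 hb (hg1 ▸ min_le_right _ _) hg1p (hb1 ▸ hb1p)
  -- min-side remainder of round 1 is below its divisor
  have hrem : r1 < a ∨ b1 < b := by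
    rcases le_total (red.tdiv a) (blue.tdiv b) with hle | hle
    · left
      have hgl : g1 = red.tdiv a := by rw [hg1, min_eq_left hle]
      have hred : 0 < red := lt_of_lt_of_le hA ha
      have htd : red.tdiv a = red / a := Int.tdiv_eq_ediv_of_nonneg (le_of_lt hred)
      have := Int.emod_lt_of_pos red hA
      have hmod : red % a = red - red / a * a := by
        rw [Int.emod_def]; ring
      rw [hr1, hgl, htd]; omega
    · right
      have hgl : g1 = blue.tdiv b := by rw [hg1, min_eq_right hle]
      have hblue : 0 < blue := lt_of_lt_of_le hB hb
      have htd : blue.tdiv b = blue / b := Int.tdiv_eq_ediv_of_nonneg (le_of_lt hblue)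
      have := Int.emod_lt_of_pos blue hB
      have hmod : blue % b = blue - blue / b * b := by
        rw [Int.emod_def]; ring
      rw [hb1, hgl, htd]; omega
  -- round 2 strictly shrinks both leftovers
  have hshrink_r : r2 < r1 := by
    have : 0 < g2 * b := mul_pos hg2p hB
    omega
  have hshrink_b : b2 < b1 := by
    have : 0 < g2 * a := mul_pos hg2p hA
    omega
  -- hence round 3's min quotient is not positive
  rw [giftPhase]
  by_cases h0 : a > r2 ∨ b > b2
  · simp [h0]
  · simp only [if_neg h0]
    have hg3 : ¬ 0 < min (r2.tdiv a) (b2.tdiv b) := by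
      rcases hrem with hlt | hlt
      · have hr2a : r2 < a := lt_trans hshrink_r hlt
        have : r2.tdiv a = 0 := by
          rw [Int.tdiv_eq_ediv_of_nonneg (le_of_lt hr2p)]
          exact Int.ediv_eq_zero_of_lt (le_of_lt hr2p) hr2a
        have hm : min (r2.tdiv a) (b2.tdiv b) ≤ 0 := this ▸ min_le_left _ _
        omega
      · have hb2b : b2 < b := lt_trans hshrink_b hlt
        have : b2.tdiv b = 0 := by
          rw [Int.tdiv_eq_ediv_of_nonneg (le_of_lt hb2p)]
          exact Int.ediv_eq_zero_of_lt (le_of_lt hb2p) hb2b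
        have hm : min (r2.tdiv a) (b2.tdiv b) ≤ 0 := this ▸ min_le_right _ _
        omega
    simp [hg3]

-- ===== VERDICT (by name: the statement is the Claim_ definition above) =====
theorem get_gift_set_count_spec : Claim_equal_get_gift_set_count := by
  intro red blue a b _ _
  unfold Spec_get_gift_set_count get_gift_set_count_alt
  rcases hp1 : giftPhase red blue a b with ⟨g1, c1, r1, b1⟩
  rw [A_phase, hp1]
  cases c1 with
  | false => simp
  | true =>
    simp only [Bool.not_true, if_true, Bool.false_eq_true, if_false]
    rcases hp2 : giftPhase r1 b1 b a with ⟨g2, c2, r2, b2⟩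
    rw [A_phase, hp2]
    cases c2 with
    | false => simp
    | true =>
      simp only [Bool.not_true, if_true, Bool.false_eq_true, if_false]
      have hstop := phase3_stop red blue a b g1 r1 b1 g2 r2 b2 hp1 hp2
      rw [A_phase]
      rcases hp3 : giftPhase r2 b2 a b with ⟨g3, c3, r3, b3⟩
      rw [hp3] at hstop
      simp only at hstop
      subst hstop
      simp [add_assoc]
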